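-- pv_equiv track=rewrite | github.com/mpunkenhofer/aoc2020 | src/day06.py | parse_answers
-- ===== SOURCE A (Python) =====
-- def parse_answers(input):
--     groups = []
--
--     current_group = set()
--
--     for line in input:
--         if not line:
--             groups.append(current_group)
--             current_group = set()
--             continue
--         current_group |= set(line)
--     return groups
-- ===== SOURCE B (Python) =====
-- def parse_answers(input):
--     lines = list(input)
--     blanks = [i for i, line in enumerate(lines) if not line]
--     starts = [0] + [b + 1 for b in blanks]
--     return [set().union(*(set(line) for line in lines[s:b]))
--             for s, b in zip(starts, blanks)]
-- ===== Notes on version B (the rewrite author's own statement) =====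
-- stated objective: alternative
-- what changed: B separates boundary-location from unioning: one scan collects the indices of blank lines, then each group is built by a bulk set().union over the slice between consecutive boundaries, instead of A's single fold with a mutable accumulator flushed at each blank line.
import Mathlib
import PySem

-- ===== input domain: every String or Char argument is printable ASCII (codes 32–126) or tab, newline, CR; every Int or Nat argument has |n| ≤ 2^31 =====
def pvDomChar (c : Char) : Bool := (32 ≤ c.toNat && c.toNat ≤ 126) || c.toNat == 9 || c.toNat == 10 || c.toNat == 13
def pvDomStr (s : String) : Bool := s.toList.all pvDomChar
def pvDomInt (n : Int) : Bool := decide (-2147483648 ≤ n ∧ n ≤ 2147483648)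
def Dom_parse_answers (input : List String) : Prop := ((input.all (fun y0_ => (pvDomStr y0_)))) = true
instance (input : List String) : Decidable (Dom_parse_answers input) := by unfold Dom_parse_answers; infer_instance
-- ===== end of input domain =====

-- B locates blank-line indices first and unions each slice between consecutive boundaries,
-- instead of A's single fold with an accumulator flushed at each blank line (objective: alternative).

-- iterating a Python string yields its characters as 1-char strings
def pvChars (line : String) : List String := line.toList.map (fun c => String.ofList [c])

-- ===== PORT A =====
def parse_answers (input : List String) : List (List String) :=
  (input.foldl
    (fun (st : List (List String) × PySem.Set String) line =>
      if line == "" then (st.1 ++ [st.2], PySem.Set.empty)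
      else (st.1, PySem.Set.union st.2 (PySem.Set.ofList (pvChars line))))
    ([], PySem.Set.empty)).1

-- ===== PORT B =====
def parse_answers_alt (input : List String) : List (List String) :=
  let lines := input
  let blanks := ((PySem.List.enumerate lines 0).filter (fun p => p.2 == "")).map (·.1)
  let starts := (0 : Int) :: blanks.map (· + 1)
  (starts.zip blanks).map (fun p =>
    (PySem.List.slice lines (some p.1) (some p.2)).foldl
      (fun acc line => PySem.Set.union acc (PySem.Set.ofList (pvChars line)))
      PySem.Set.empty)

-- ===== PRECONDITION & SPEC =====
def Spec_parse_answers (input : List String) (out : List (List String)) : Prop := out = parse_answers_alt input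
instance (input : List String) (out : List (List String)) : Decidable (Spec_parse_answers input out) := by unfold Spec_parse_answers; infer_instance

-- ===== CLAIM (what is proved, stated in full; the proofs are below) =====
def Claim_equal_parse_answers : Prop := ∀ (input : List String), Dom_parse_answers input → Spec_parse_answers input (parse_answers input)

-- ===== LEMMAS AND PROOFS =====

def pvStep (cur : PySem.Set String) (l : String) : PySem.Set String :=
  PySem.Set.union cur (PySem.Set.ofList (pvChars l))

def pvGrp (cur : PySem.Set String) (seg : List String) : PySem.Set String :=
  seg.foldl pvStep cur

-- reference recursion: A's groups from seed `cur`
def pvGen (cur : PySem.Set String) : List String → List (List String)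
  | [] => []
  | l :: rest => if l == "" then cur :: pvGen PySem.Set.empty rest else pvGen (pvStep cur l) rest

-- blank-line indices starting at offset s
def pvBlanks (s : Int) : List String → List Int
  | [] => []
  | l :: rest => if l == "" then s :: pvBlanks (s + 1) rest else pvBlanks (s + 1) rest

-- consecutive (start, boundary) pairs
def pvPairs (s : Int) : List Int → List (Int × Int)
  | [] => []
  | b :: bs => (s, b) :: pvPairs (b + 1) bs

theorem pvA_eq (input : List String) (groups : List (List String)) (cur : PySem.Set String) :
    (input.foldl
      (fun (st : List (List String) × PySem.Set String) line =>
        if line == "" then (st.1 ++ [st.2], PySem.Set.empty)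
        else (st.1, PySem.Set.union st.2 (PySem.Set.ofList (pvChars line))))
      (groups, cur)).1 = groups ++ pvGen cur input := by
  induction input generalizing groups cur with
  | nil => simp [pvGen]
  | cons l rest ih =>
    rw [List.foldl_cons]
    by_cases h : l == ""
    · rw [if_pos h, ih]
      simp [pvGen, h]
    · rw [if_neg h, ih]
      simp [pvGen, h, pvStep]

theorem pvBlanks_enum (input : List String) (s : Int) :
    ((PySem.List.enumerate input s).filter (fun p => p.2 == "")).map (·.1) = pvBlanks s input := by
  induction input generalizing s with
  | nil => simp [PySem.List.enumerate_nil, pvBlanks]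
  | cons l rest ih =>
    by_cases h : l == "" <;>
      simp [PySem.List.enumerate_cons, h, pvBlanks, ih]

theorem pvBlanks_nonneg (input : List String) (s : Int) (b : Int)
    (hb : b ∈ pvBlanks s input) : s ≤ b := by
  induction input generalizing s with
  | nil => simp [pvBlanks] at hb
  | cons l rest ih =>
    simp only [pvBlanks] at hb
    split at hb
    · rcases List.mem_cons.mp hb with h | h
      · omega
      · have := ih (s + 1) h; omega
    · have := ih (s + 1) hb; omega

theorem pvZip_pairs (bl : List Int) (s : Int) :
    (s :: bl.map (· + 1)).zip bl = pvPairs s bl := by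
  induction bl generalizing s with
  | nil => simp [pvPairs]
  | cons b bs ih => simp [pvPairs, List.zip, ← ih (b + 1)]

theorem pvSlice_shift (l : String) (rest : List String) (s b : Int)
    (hs : 0 ≤ s) (hb : 0 ≤ b) :
    PySem.List.slice (l :: rest) (some (s + 1)) (some (b + 1)) = PySem.List.slice rest (some s) (some b) := by
  rw [PySem.List.slice_toNat _ (by omega) (by omega),
      PySem.List.slice_toNat _ hs hb]
  have h1 : (s + 1).toNat = s.toNat + 1 := by omega
  have h2 : (b + 1).toNat = b.toNat + 1 := by omega
  simp [h1, h2]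

theorem pvBlanks_shift (input : List String) (s : Int) :
    pvBlanks (s + 1) input = (pvBlanks s input).map (· + 1) := by
  induction input generalizing s with
  | nil => simp [pvBlanks]
  | cons l rest ih =>
    by_cases h : l == "" <;> simp [pvBlanks, h, ih (s + 1)]

theorem pvBlanks_one (input : List String) :
    pvBlanks 1 input = (pvBlanks 0 input).map (· + 1) := by
  have h := pvBlanks_shift input 0
  norm_num at h
  exact h

-- B's value with the first slice seeded from `cur`
def pvMap (cur : PySem.Set String) (input : List String) : List (List String) :=
  match pvPairs 0 (pvBlanks 0 input) with
  | [] => []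
  | p :: ps =>
    pvGrp cur (PySem.List.slice input (some p.1) (some p.2))
      :: ps.map (fun q => pvGrp PySem.Set.empty (PySem.List.slice input (some q.1) (some q.2)))

theorem pvShift_map (l : String) (rest : List String) (bl : List Int) (s : Int)
    (hs : 0 ≤ s) (hbl : ∀ b ∈ bl, 0 ≤ b) :
    (pvPairs (s + 1) (bl.map (· + 1))).map
        (fun q => pvGrp PySem.Set.empty (PySem.List.slice (l :: rest) (some q.1) (some q.2)))
      = (pvPairs s bl).map
        (fun q => pvGrp PySem.Set.empty (PySem.List.slice rest (some q.1) (some q.2))) := by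
  induction bl generalizing s with
  | nil => simp [pvPairs]
  | cons b bs ih =>
    have hb : 0 ≤ b := hbl b (by simp)
    simp only [List.map_cons, pvPairs, List.map]
    congr 1
    · rw [pvSlice_shift l rest s b hs hb]
    · exact ih (b + 1) (by omega) (fun x hx => hbl x (by simp [hx]))

theorem pvMap_empty_uniform (input : List String) :
    pvMap PySem.Set.empty input
      = (pvPairs 0 (pvBlanks 0 input)).map
          (fun q => pvGrp PySem.Set.empty (PySem.List.slice input (some q.1) (some q.2))) := by
  unfold pvMap
  cases pvPairs 0 (pvBlanks 0 input) <;> simp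

theorem pvMain (input : List String) (cur : PySem.Set String) :
    pvMap cur input = pvGen cur input := by
  induction input generalizing cur with
  | nil => simp [pvMap, pvBlanks, pvPairs, pvGen]
  | cons l rest ih =>
    have hnn : ∀ b ∈ pvBlanks 0 rest, 0 ≤ b := fun b hb => pvBlanks_nonneg rest 0 b hb
    by_cases h : l == ""
    · -- blank line: emit cur as an (empty-slice) group, recurse from empty
      have hblanks : pvBlanks 0 (l :: rest) = 0 :: (pvBlanks 0 rest).map (· + 1) := by
        simp [pvBlanks, h, pvBlanks_one]
      have hslice : PySem.List.slice (l :: rest) (some (0 : Int)) (some (0 : Int)) = [] := by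
        rw [PySem.List.slice_toNat _ (by omega) (by omega)]; simp
      rw [pvGen, if_pos h, ← ih PySem.Set.empty, pvMap_empty_uniform]
      unfold pvMap
      rw [hblanks]
      simp only [pvPairs]
      congr 1
      exact pvShift_map l rest (pvBlanks 0 rest) 0 (by omega) hnn
    · -- non-blank line: fold l into the first group's seed
      rw [pvGen, if_neg h, ← ih (pvStep cur l)]
      unfold pvMap
      have hblanks : pvBlanks 0 (l :: rest) = (pvBlanks 0 rest).map (· + 1) := by
        simp [pvBlanks, h, pvBlanks_one]
      rw [hblanks]
      cases hbl : pvBlanks 0 rest with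
      | nil => simp [pvPairs]
      | cons c cs =>
        have hc : 0 ≤ c := hnn c (by simp [hbl])
        have hcs : ∀ b ∈ cs, 0 ≤ b := fun b hb => hnn b (by simp [hbl, hb])
        simp only [List.map_cons, pvPairs]
        congr 1
        · -- first group: slice (l::rest) 0 (c+1) = l :: slice rest 0 c
          have h1 : PySem.List.slice (l :: rest) (some (0 : Int)) (some (c + 1))
              = l :: PySem.List.slice rest (some (0 : Int)) (some c) := by
            rw [PySem.List.slice_toNat _ (by omega) (by omega),
                PySem.List.slice_toNat _ (by omega) hc]
            have : (c + 1).toNat = c.toNat + 1 := by omega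
            simp [this]
          rw [h1]
          simp [pvGrp, List.foldl]
        · exact pvShift_map l rest cs (c + 1) (by omega) hcs

theorem pvAlt_eq (input : List String) :
    parse_answers_alt input = pvMap PySem.Set.empty input := by
  unfold parse_answers_alt
  rw [pvMap_empty_uniform]
  simp only [pvBlanks_enum, pvZip_pairs]
  rfl

-- ===== VERDICT (by name: the statement is the Claim_ definition above) =====
theorem parse_answers_spec : Claim_equal_parse_answers := by
  intro input _
  unfold Spec_parse_answers
  rw [pvAlt_eq, pvMain]
  unfold parse_answers
  rw [pvA_eq input [] PySem.Set.empty]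
  simp
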